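-- pv_equiv track=rewrite | github.com/wwan13/algorithm | python/boj_2164.py | solution
-- ===== SOURCE A (Python) =====
-- from collections import deque
--
-- def solution(n):
--     queue = deque()
--     [queue.append(i) for i in range(1, n+1)]
--
--     while len(queue) > 1:
--         # 제일 위에 있는 카드를 바닥에 버린다
--         queue.popleft()
--
--         # 그 다음 제일 위에 있는 카드를
--         num = queue.popleft()
--
--         # 제일 아래에 있는 카드 밑으로 옮긴다
--         queue.append(num)
--
--     return queue.popleft()
-- ===== SOURCE B (Python) =====
-- def solution(n):
--     # largest power of two <= n, then Josephus closed form
--     p = 1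
--     while p * 2 <= n:
--         p *= 2
--     return n if n == p else 2 * (n - p)
-- ===== Notes on version B (the rewrite author's own statement) =====
-- stated objective: faster
-- what changed: Replaces the O(n) deque simulation of the discard/move process by the Josephus closed form: find the largest power of two p <= n and return n if n == p else 2*(n - p).
import Mathlib
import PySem

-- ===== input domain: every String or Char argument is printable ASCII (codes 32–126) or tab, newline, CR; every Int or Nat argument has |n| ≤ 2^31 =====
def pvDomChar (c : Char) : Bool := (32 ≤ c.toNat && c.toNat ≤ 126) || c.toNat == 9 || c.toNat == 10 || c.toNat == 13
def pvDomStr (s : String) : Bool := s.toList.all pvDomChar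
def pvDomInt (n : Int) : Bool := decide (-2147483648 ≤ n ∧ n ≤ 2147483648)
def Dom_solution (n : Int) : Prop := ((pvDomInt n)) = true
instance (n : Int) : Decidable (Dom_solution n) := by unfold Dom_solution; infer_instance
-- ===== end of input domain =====

-- B replaces A's O(n) deque simulation of the discard/move card process by the Josephus closed form (largest power of two p ≤ n; answer n if n = p else 2*(n-p)).


-- ===== PORT A =====
-- Python's deque with O(1) ends, modelled as (front, reversed back) with its stored size;
-- popleft: take from front, refilling it from back when empty (returns none on an empty deque = IndexError)
def pyPopleft (q : List Int × List Int) : Option (Int × (List Int × List Int)) :=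
  match q with
  | (x :: f, b) => some (x, (f, b))
  | ([], b) =>
    match b.reverse with
    | x :: f => some (x, (f, []))
    | [] => none

-- the while loop: while len(queue) > 1: queue.popleft(); num = queue.popleft(); queue.append(num)
-- sz is the deque's stored length (len(queue)); the none fallbacks are unreachable since sz = |f| + |b|
def solLoop : Nat → List Int → List Int → List Int × List Int
  | sz+2, f, b =>
    match pyPopleft (f, b) with
    | some (_, (f1, b1)) =>
      match pyPopleft (f1, b1) with
      | some (num, (f2, b2)) => solLoop (sz+1) f2 (num :: b2)
      | none => (f1, b1)
    | none => (f, b)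
  | _, f, b => (f, b)

-- final queue.popleft(): raises IndexError on an empty deque (n ≤ 0), excluded by Pre_solution; 0 is a dead default there
def solution (n : Int) : Int :=
  let q := PySem.List.pyRange 1 (n + 1) 1
  match pyPopleft (solLoop q.length q []) with
  | some (x, _) => x
  | none => 0

-- ===== PORT B =====
-- while p * 2 <= n: p *= 2   (the proof argument 1 ≤ p only justifies termination)
def altLoop (n p : Int) (hp : 1 ≤ p) : Int :=
  if h : p * 2 ≤ n then altLoop n (p * 2) (by omega) else p
termination_by (n - p).toNat
decreasing_by omega

def solution_alt (n : Int) : Int :=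
  let p := altLoop n 1 (by omega)
  if n = p then n else 2 * (n - p)

-- ===== PRECONDITION & SPEC =====
-- Pre_ excludes exactly n ≤ 0, where A's final queue.popleft() raises IndexError (empty deque)
def Pre_solution (n : Int) : Prop := 1 ≤ n
instance (n : Int) : Decidable (Pre_solution n) := by unfold Pre_solution; infer_instance
def pvWitness_solution : Int := (5)
def Spec_solution (n : Int) (out : Int) : Prop := out = solution_alt n
instance (n : Int) (out : Int) : Decidable (Spec_solution n out) := by unfold Spec_solution; infer_instance

-- ===== CLAIM (what is proved, stated in full; the proofs are below) =====
def Claim_equal_solution : Prop := ∀ (n : Int), Dom_solution n → Pre_solution n → Spec_solution n (solution n)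

-- ===== LEMMAS AND PROOFS =====

-- ---- B-side: altLoop returns the largest power of two ≤ n ----

theorem alt_spec (n : Int) : ∀ (p : Int) (hp : 1 ≤ p), p ≤ n → altLoop n p hp ≤ n ∧ n < 2 * altLoop n p hp := by
  intro p hp
  induction p, hp using altLoop.induct n with
  | case1 p hp h ih =>
      intro hpn
      rw [altLoop, dif_pos h]
      exact ih (by omega)
  | case2 p hp h =>
      intro hpn
      rw [altLoop, dif_neg h]
      omega

theorem alt_double (n : Int) : ∀ (p : Int) (hp : 1 ≤ p) (hp2 : 1 ≤ p * 2),
    altLoop (2 * n) (p * 2) hp2 = 2 * altLoop n p hp := by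
  intro p hp
  induction p, hp using altLoop.induct n with
  | case1 p hp h ih =>
      intro hp2
      conv_lhs => rw [altLoop]
      conv_rhs => rw [altLoop]
      rw [dif_pos h, dif_pos (by omega : p * 2 * 2 ≤ 2 * n)]
      exact ih _
  | case2 p hp h =>
      intro hp2
      conv_lhs => rw [altLoop]
      conv_rhs => rw [altLoop]
      rw [dif_neg h, dif_neg (by omega : ¬ p * 2 * 2 ≤ 2 * n)]
      ring

theorem alt_odd_eq (n : Int) : ∀ (p : Int) (hp : 1 ≤ p) (hp2 : 1 ≤ p * 2),
    altLoop (2 * n + 1) (p * 2) hp2 = altLoop (2 * n) (p * 2) hp2 := by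
  intro p hp
  induction p, hp using altLoop.induct n with
  | case1 p hp h ih =>
      intro hp2
      conv_lhs => rw [altLoop]
      conv_rhs => rw [altLoop]
      rw [dif_pos (by omega : p * 2 * 2 ≤ 2 * n + 1), dif_pos (by omega : p * 2 * 2 ≤ 2 * n)]
      exact ih _
  | case2 p hp h =>
      intro hp2
      conv_lhs => rw [altLoop]
      conv_rhs => rw [altLoop]
      rw [dif_neg (by omega : ¬ p * 2 * 2 ≤ 2 * n + 1), dif_neg (by omega : ¬ p * 2 * 2 ≤ 2 * n)]

theorem alt_even (k : Int) (hk : 1 ≤ k) : solution_alt (2 * k) = 2 * solution_alt k := by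
  have hunf : altLoop (2 * k) 1 (by omega) = 2 * altLoop k 1 (by omega) := by
    rw [altLoop, dif_pos (by omega : (1:Int) * 2 ≤ 2 * k)]
    rw [alt_double k 1 (by omega)]
  rw [solution_alt, solution_alt]
  simp only [hunf]
  by_cases h : k = altLoop k 1 (by omega)
  · rw [if_pos (by omega), if_pos (by omega)]
  · rw [if_neg (by omega), if_neg (by omega)]
    ring

theorem alt_ge (n : Int) : ∀ (p : Int) (hp : 1 ≤ p), p ≤ altLoop n p hp := by
  intro p hp
  induction p, hp using altLoop.induct n with
  | case1 p hp h ih =>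
      rw [altLoop, dif_pos h]
      omega
  | case2 p hp h =>
      rw [altLoop, dif_neg h]

theorem alt_odd (k : Int) (hk : 1 ≤ k) :
    solution_alt (2 * k + 1) = if solution_alt (2 * k) = 2 * k then 2 else solution_alt (2 * k) + 2 := by
  have hq := alt_ge k 1 (by omega)
  have hqs := alt_spec k 1 (by omega) (by omega)
  set q : Int := altLoop k 1 (by omega) with hqdef
  have hunf : altLoop (2 * k) 1 (by omega) = 2 * q := by
    rw [altLoop, dif_pos (by omega : (1:Int) * 2 ≤ 2 * k)]
    rw [alt_double k 1 (by omega)]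
  have hunf' : altLoop (2 * k + 1) 1 (by omega) = 2 * q := by
    rw [altLoop, dif_pos (by omega : (1:Int) * 2 ≤ 2 * k + 1)]
    rw [alt_odd_eq k 1 (by omega), alt_double k 1 (by omega)]
  rw [solution_alt, solution_alt]
  simp only [hunf, hunf']
  rw [if_neg (by omega : ¬ 2 * k + 1 = 2 * q)]
  by_cases h : 2 * k = 2 * q
  · rw [if_pos h, if_pos (by omega)]
    omega
  · rw [if_neg h, if_neg (by omega)]
    omega

-- ---- A-side: the deque loop abstracted to a single list (proof-side) ----

def solutionLoop (q : List Int) : List Int :=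
  match q with
  | _ :: b :: rest => solutionLoop (rest ++ [b])
  | _ => q
termination_by q.length
decreasing_by simp

theorem popleft_spec (f b : List Int) (x : Int) (t : List Int) (h : f ++ b.reverse = x :: t) :
    ∃ f' b', pyPopleft (f, b) = some (x, (f', b')) ∧ f' ++ b'.reverse = t := by
  cases f with
  | cons y f =>
      simp only [List.cons_append, List.cons.injEq] at h
      exact ⟨f, b, by rw [pyPopleft, h.1], h.2⟩
  | nil =>
      simp only [List.nil_append] at h
      refine ⟨t, [], ?_, by simp⟩
      rw [pyPopleft]
      rw [h]

theorem sl_short (l : List Int) (h : l.length ≤ 1) : solutionLoop l = l := by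
  match l with
  | [] => rw [solutionLoop]; exact fun _ _ _ h => by cases h
  | [x] => rw [solutionLoop]; exact fun _ _ _ h => by cases h
  | _ :: _ :: _ => simp at h

theorem solLoop_eq : ∀ (sz : Nat) (f b : List Int), sz = f.length + b.length →
    (solLoop sz f b).1 ++ (solLoop sz f b).2.reverse = solutionLoop (f ++ b.reverse) := by
  intro sz
  induction sz using Nat.strong_induction_on with
  | _ sz ih =>
      intro f b hsz
      match sz, hsz with
      | 0, hsz =>
          have h0 : solLoop 0 f b = (f, b) := rfl
          rw [h0, sl_short _ (by simp; omega)]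
      | 1, hsz =>
          have h0 : solLoop 1 f b = (f, b) := rfl
          rw [h0, sl_short _ (by simp; omega)]
      | sz+2, hsz =>
          have hlen : (f ++ b.reverse).length = sz + 2 := by simp; omega
          match hq : f ++ b.reverse with
          | [] => rw [hq] at hlen; simp at hlen
          | [x] => rw [hq] at hlen; simp at hlen
          | a :: c :: t =>
              obtain ⟨f1, b1, hp1, he1⟩ := popleft_spec f b a (c :: t) hq
              obtain ⟨f2, b2, hp2, he2⟩ := popleft_spec f1 b1 c t he1
              rw [solLoop]
              split
              · rename_i a' f1' b1' heq
                rw [hp1] at heq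
                simp only [Option.some.injEq, Prod.mk.injEq] at heq
                obtain ⟨-, h12, h13⟩ := heq
                subst h12
                subst h13
                split
                · rename_i c' f2' b2' heq'
                  rw [hp2] at heq'
                  simp only [Option.some.injEq, Prod.mk.injEq] at heq'
                  obtain ⟨h21, h22, h23⟩ := heq'
                  subst h21; subst h22; subst h23
                  have hlen2 : sz + 1 = f2.length + (c :: b2).length := by
                    have h2 := congrArg List.length he2
                    rw [hq] at hlen
                    simp at h2 hlen ⊢
                    omega
                  rw [ih (sz+1) (by omega) f2 (c :: b2) hlen2]
                  conv_rhs => rw [solutionLoop]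
                  congr 1
                  have hc : (c :: b2).reverse = b2.reverse ++ [c] := by simp
                  rw [hc, ← List.append_assoc, he2]
                · rename_i heq'
                  rw [hp2] at heq'
                  cases heq'
              · rename_i heq
                rw [hp1] at heq
                cases heq

-- ---- structure of the abstract deque loop ----

theorem sl_map (f : Int → Int) : ∀ l, solutionLoop (l.map f) = (solutionLoop l).map f := by
  intro l
  induction l using solutionLoop.induct with
  | case1 a b rest ih =>
      rw [List.map_cons, List.map_cons, solutionLoop, solutionLoop, ← ih]
      simp
  | case2 q h =>
      match q, h with
      | [], _ => simp [solutionLoop]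
      | [a], _ => simp [solutionLoop]
      | a :: b :: t, h => exact absurd rfl (h a b t)

theorem sl_singleton : ∀ l : List Int, l ≠ [] → ∃ x, solutionLoop l = [x] := by
  intro l
  induction l using solutionLoop.induct with
  | case1 a b rest ih =>
      intro _
      rw [solutionLoop]
      exact ih (by simp)
  | case2 q h =>
      match q, h with
      | [], _ => intro h'; exact absurd rfl h'
      | [a], _ => intro _; exact ⟨a, by rw [solutionLoop]; exact fun _ _ _ h => by cases h⟩
      | a :: b :: t, h => exact absurd rfl (h a b t)

def evens : List Int → List Int
  | _ :: b :: t => b :: evens t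
  | _ => []

theorem evens_append_even : ∀ l r : List Int, l.length % 2 = 0 → evens (l ++ r) = evens l ++ evens r := by
  intro l
  induction l using evens.induct with
  | case1 a b t ih =>
      intro r h
      simp only [List.cons_append, evens]
      rw [ih r (by simp at h; omega)]
  | case2 q h =>
      match q, h with
      | [], _ => intro r _; simp [evens]
      | [a], _ => intro r h'; simp at h'
      | a :: b :: t, h => exact absurd rfl (h a b t)

theorem pass_even : ∀ (l acc : List Int), l.length % 2 = 0 →
    solutionLoop (l ++ acc) = solutionLoop (acc ++ evens l) := by
  intro l
  induction l using evens.induct with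
  | case1 a b t ih =>
      intro acc h
      have h' : t.length % 2 = 0 := by simp at h; omega
      calc solutionLoop ((a :: b :: t) ++ acc)
          = solutionLoop ((t ++ acc) ++ [b]) := by rw [List.cons_append, List.cons_append, solutionLoop]
        _ = solutionLoop (t ++ (acc ++ [b])) := by rw [List.append_assoc]
        _ = solutionLoop ((acc ++ [b]) ++ evens t) := ih (acc ++ [b]) h'
        _ = solutionLoop (acc ++ evens (a :: b :: t)) := by rw [evens]; simp
  | case2 q h =>
      match q, h with
      | [], _ => intro acc _; simp [evens]
      | [a], _ => intro acc h'; simp at h'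
      | a :: b :: t, h => exact absurd rfl (h a b t)

-- ---- ranges 1..m and their evens ----

def myRange (m : Nat) : List Int := (List.range m).map (fun (k : Nat) => 1 + (k : Int))

theorem myRange_length (m : Nat) : (myRange m).length = m := by simp [myRange]

theorem myRange_getElem (m i : Nat) (h : i < (myRange m).length) :
    (myRange m)[i] = 1 + (i : Int) := by
  unfold myRange
  rw [List.getElem_map, List.getElem_range]

theorem myRange_ne_nil (m : Nat) (h : 1 ≤ m) : myRange m ≠ [] := by
  intro hnil
  have := congrArg List.length hnil
  rw [myRange_length] at this
  simp at this
  omega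

theorem myRange_append_two (m : Nat) :
    myRange (m + 2) = myRange m ++ [1 + (m : Int), 2 + (m : Int)] := by
  apply List.ext_getElem
  · simp [myRange_length]
  · intro i h1 h2
    rw [myRange_getElem]
    rw [myRange_length] at h1
    by_cases hi : i < m
    · rw [List.getElem_append_left (by rw [myRange_length]; omega), myRange_getElem]
    · by_cases hi2 : i = m
      · subst hi2
        rw [List.getElem_append_right (by simp [myRange_length])]
        simp [myRange_length]
      · have : i = m + 1 := by omega
        subst this
        rw [List.getElem_append_right (by simp [myRange_length])]
        simp [myRange_length]
        ring

theorem myRange_append_one (m : Nat) : myRange (m + 1) = myRange m ++ [1 + (m : Int)] := by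
  simp [myRange, List.range_succ]

theorem evens_myRange (m : Nat) : evens (myRange (2 * m)) = (myRange m).map (fun x => 2 * x) := by
  induction m with
  | zero => simp [myRange, evens]
  | succ k ih =>
      have h2 : 2 * (k + 1) = 2 * k + 2 := by ring
      rw [h2, myRange_append_two, evens_append_even _ _ (by simp [myRange_length]), ih]
      rw [myRange_append_one]
      simp [evens]
      ring

theorem odd_shape (k : Nat) (hk : 1 ≤ k) :
    myRange (2 * k + 1) = 1 :: 2 :: ((myRange (2 * k - 1)).map (fun x => x + 2)) := by
  apply List.ext_getElem
  · simp [myRange_length]; omega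
  · intro i h1 h2
    rw [myRange_getElem]
    match i with
    | 0 => simp
    | 1 => simp
    | (j+2) =>
        simp only [List.getElem_cons_succ]
        rw [List.getElem_map, myRange_getElem]
        push_cast
        ring

theorem gmap (k : Nat) (hk : 1 ≤ k) :
    (myRange (2 * k - 1)).map (fun x => x + 2) ++ [(2:Int)] =
    (myRange (2 * k)).map (fun x => if x = 2 * (k:Int) then 2 else x + 2) := by
  apply List.ext_getElem
  · simp [myRange_length]; omega
  · intro i h1 h2
    rw [List.getElem_map, myRange_getElem]
    by_cases hi : i < 2 * k - 1
    · rw [List.getElem_append_left (by simp [myRange_length]; omega)]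
      rw [List.getElem_map, myRange_getElem]
      rw [if_neg (by omega)]
    · have hieq : i = 2 * k - 1 := by
        simp [myRange_length] at h2; omega
      subst hieq
      rw [List.getElem_append_right (by simp [myRange_length])]
      rw [if_pos (by omega)]
      simp [myRange_length]

-- ---- the survivor value J and its recurrences ----

def J (m : Nat) : Int := (solutionLoop (myRange m)).headD 0

theorem J_even (k : Nat) (hk : 1 ≤ k) : J (2 * k) = 2 * J k := by
  obtain ⟨x, hx⟩ := sl_singleton (myRange k) (myRange_ne_nil k hk)
  have h1 := pass_even (myRange (2 * k)) [] (by rw [myRange_length]; omega)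
  rw [List.append_nil, List.nil_append, evens_myRange, sl_map, hx] at h1
  rw [J, J, h1, hx]
  simp

theorem J_odd (k : Nat) (hk : 1 ≤ k) :
    J (2 * k + 1) = if J (2 * k) = 2 * (k : Int) then 2 else J (2 * k) + 2 := by
  obtain ⟨x, hx⟩ := sl_singleton (myRange (2 * k)) (myRange_ne_nil _ (by omega))
  have h1 : solutionLoop (myRange (2 * k + 1))
      = solutionLoop ((myRange (2 * k - 1)).map (fun x => x + 2) ++ [(2:Int)]) := by
    rw [odd_shape k hk, solutionLoop]
  rw [gmap k hk, sl_map, hx] at h1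
  rw [J, J, h1, hx]
  simp

-- ---- the main induction ----

theorem J_eq_alt : ∀ m : Nat, 1 ≤ m → J m = solution_alt (m : Int) := by
  intro m
  induction m using Nat.strong_induction_on with
  | _ m ih =>
      intro hm
      match m, hm with
      | 1, _ =>
          have h1 : J 1 = 1 := by
            rw [J]
            have : myRange 1 = [1] := by simp [myRange]
            rw [this, solutionLoop]
            · simp
            · exact fun _ _ _ h => by cases h
          have h2 : solution_alt 1 = 1 := by
            rw [solution_alt, altLoop, dif_neg (by omega : ¬ (1:Int) * 2 ≤ 1)]
            norm_num
          rw [h1, Nat.cast_one, h2]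
      | (m+2), _ =>
          rcases Nat.even_or_odd (m + 2) with ⟨k, hk⟩ | ⟨k, hk⟩
          · have hk1 : 1 ≤ k := by omega
            have hcast : ((m + 2 : Nat) : Int) = 2 * (k : Int) := by push_cast; omega
            rw [show m + 2 = 2 * k by omega, J_even k hk1, ih k (by omega) hk1]
            rw [show ((2 * k : Nat) : Int) = 2 * (k : Int) by push_cast; ring]
            rw [alt_even (k : Int) (by exact_mod_cast hk1)]
          · have hk1 : 1 ≤ k := by omega
            have h2k : 1 ≤ 2 * k := by omega
            rw [show m + 2 = 2 * k + 1 by omega, J_odd k hk1]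
            rw [J_even k hk1, ih k (by omega) hk1]
            have hcast2 : ((k : Nat) : Int) * 2 = 2 * (k : Int) := by ring
            have halt2 : 2 * solution_alt (k : Int) = solution_alt (2 * (k : Int)) :=
              (alt_even (k : Int) (by exact_mod_cast hk1)).symm
            rw [halt2]
            rw [show ((2 * k + 1 : Nat) : Int) = 2 * (k : Int) + 1 by push_cast; ring]
            rw [alt_odd (k : Int) (by exact_mod_cast hk1)]

-- ---- gluing to the ports ----

theorem solution_eq_J (n : Int) (hn : 1 ≤ n) : solution n = J n.toNat := by
  have hr : PySem.List.pyRange 1 (n + 1) 1 = myRange n.toNat := by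
    rw [PySem.List.pyRange_one]
    rw [show (n + 1 - 1) = n by ring]
    rfl
  obtain ⟨x, hx⟩ := sl_singleton (myRange n.toNat) (myRange_ne_nil _ (by omega))
  have hlp := solLoop_eq (myRange n.toNat).length (myRange n.toNat) [] (by simp)
  rw [List.reverse_nil, List.append_nil, hx] at hlp
  obtain ⟨f', b', hp, _⟩ :=
    popleft_spec (solLoop (myRange n.toNat).length (myRange n.toNat) []).1
      (solLoop (myRange n.toNat).length (myRange n.toNat) []).2 x [] hlp
  rw [solution, J, hx]
  simp only [hr]
  rw [hp]
  simp

-- ===== VERDICT (by name: the statement is the Claim_ definition above) =====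
theorem solution_spec : Claim_equal_solution := by
  intro n _ hpre
  have hn : 1 ≤ n := hpre
  unfold Spec_solution
  rw [solution_eq_J n hn, J_eq_alt n.toNat (by omega)]
  rw [Int.toNat_of_nonneg (by omega)]
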